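-- pv_equiv track=rewrite | github.com/philsurette/androcles | src/play_text_parser.py | collapse_to_paragraphs
-- ===== SOURCE A (Python) =====
-- def collapse_to_paragraphs(text: str) -> list[str]:
--     """
--     Join consecutive non-empty lines with spaces and use blank lines as
--     paragraph boundaries, without emitting blank lines.
--     """
--     output: list[str] = []
--     buffer: list[str] = []
--
--     for raw_line in text.splitlines():
--         # Treat any whitespace-only line as a boundary.
--         if raw_line.strip():
--             buffer.append(raw_line.strip())
--         else:
--             if buffer:
--                 output.append(" ".join(buffer))
--                 buffer.clear()
--
--     if buffer:
--         output.append(" ".join(buffer))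
--
--     return output
-- ===== SOURCE B (Python) =====
-- def collapse_to_paragraphs(text: str) -> list[str]:
--     """Group pre-stripped lines into runs of non-blank lines, recursively."""
--     def go(lines):
--         if not lines:
--             return []
--         if not lines[0]:
--             return go(lines[1:])
--         k = 1
--         while k < len(lines) and lines[k]:
--             k += 1
--         return [" ".join(lines[:k])] + go(lines[k:])
--     return go([ln.strip() for ln in text.splitlines()])
-- ===== Notes on version B (the rewrite author's own statement) =====
-- stated objective: alternative
-- what changed: Replaces A's imperative buffer-and-flush state machine with a recursive run-grouping pass over pre-stripped lines: each paragraph is the leading run of non-blank lines, joined and consed onto the recursion on the remainder.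
import Mathlib
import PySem

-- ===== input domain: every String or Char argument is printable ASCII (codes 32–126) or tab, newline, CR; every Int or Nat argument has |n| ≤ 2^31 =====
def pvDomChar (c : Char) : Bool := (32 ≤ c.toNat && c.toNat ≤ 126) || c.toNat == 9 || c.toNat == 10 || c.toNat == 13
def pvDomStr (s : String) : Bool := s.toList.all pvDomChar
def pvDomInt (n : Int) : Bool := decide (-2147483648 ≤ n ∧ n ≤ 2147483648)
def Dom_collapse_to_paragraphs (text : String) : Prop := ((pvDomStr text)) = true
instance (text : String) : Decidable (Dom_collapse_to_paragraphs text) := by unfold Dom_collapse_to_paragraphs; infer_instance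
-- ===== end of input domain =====

-- B replaces A's buffer-and-flush state machine with recursive run-grouping over pre-stripped lines (alternative decomposition, same cost).


-- ===== PORT A =====
-- state: (output, buffer); flush at a blank line and once at the end
def pvStepA (st : List String × List String) (raw : String) : List String × List String :=
  if PySem.Str.strip raw ≠ "" then (st.1, st.2 ++ [PySem.Str.strip raw])
  else if st.2 ≠ [] then (st.1 ++ [PySem.Str.join " " st.2], []) else st

def collapse_to_paragraphs (text : String) : List String :=
  let st := (PySem.Str.splitlines text).foldl pvStepA ([], [])
  if st.2 ≠ [] then st.1 ++ [PySem.Str.join " " st.2] else st.1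

-- ===== PORT B =====
-- go: skip blank heads; otherwise the paragraph is the leading run (lines[:k]) and recurse on lines[k:]
def pvGoB : List String → List String
  | [] => []
  | s :: rest =>
    if s = "" then pvGoB rest
    else PySem.Str.join " " ((s :: rest).takeWhile (· ≠ "")) ::
         pvGoB ((s :: rest).dropWhile (· ≠ ""))
termination_by ls => ls.length
decreasing_by
  · simp
  · simp only [List.dropWhile]
    have h : (decide (s ≠ "")) = true := by simp; assumption
    rw [h]
    simpa using Nat.lt_succ_of_le (List.length_dropWhile_le _ _)

def collapse_to_paragraphs_alt (text : String) : List String :=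
  pvGoB ((PySem.Str.splitlines text).map PySem.Str.strip)

-- ===== PRECONDITION & SPEC =====
def Spec_collapse_to_paragraphs (text : String) (out : List String) : Prop := out = collapse_to_paragraphs_alt text
instance (text : String) (out : List String) : Decidable (Spec_collapse_to_paragraphs text out) := by unfold Spec_collapse_to_paragraphs; infer_instance

-- ===== CLAIM (what is proved, stated in full; the proofs are below) =====
def Claim_equal_collapse_to_paragraphs : Prop := ∀ (text : String), Dom_collapse_to_paragraphs text → Spec_collapse_to_paragraphs text (collapse_to_paragraphs text)

-- ===== LEMMAS AND PROOFS =====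

-- A's step on already-stripped input (strip (strip x) = strip x)
def pvStep (st : List String × List String) (x : String) : List String × List String :=
  if x ≠ "" then (st.1, st.2 ++ [x])
  else if st.2 ≠ [] then (st.1 ++ [PySem.Str.join " " st.2], []) else st

def pvFinish (st : List String × List String) : List String :=
  if st.2 ≠ [] then st.1 ++ [PySem.Str.join " " st.2] else st.1

-- functional reading of A's fold: paragraphs of ls with a pending buffer buf
def pvJoinRuns (buf : List String) : List String → List String
  | [] => if buf ≠ [] then [PySem.Str.join " " buf] else []
  | x :: rest =>
    if x ≠ "" then pvJoinRuns (buf ++ [x]) rest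
    else (if buf ≠ [] then [PySem.Str.join " " buf] else []) ++ pvJoinRuns [] rest

theorem pvStepA_eq (st : List String × List String) (raw : String) :
    pvStepA st raw = pvStep st (PySem.Str.strip raw) := by
  simp [pvStepA, pvStep]

theorem pv_fold_inv (ls : List String) (out buf : List String) :
    pvFinish (ls.foldl pvStep (out, buf)) = out ++ pvJoinRuns buf ls := by
  induction ls generalizing out buf with
  | nil => simp [pvFinish, pvJoinRuns]; split <;> simp
  | cons x rest ih =>
    simp only [List.foldl_cons, pvJoinRuns, pvStep]
    by_cases hx : x = "" <;> simp [hx]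
    · by_cases hb : buf = [] <;> simp [hb, ih]
    · exact ih _ _

theorem pvGoB_take_drop (ls : List String) :
    pvGoB ls =
      (if ls.takeWhile (· ≠ "") ≠ [] then
        [PySem.Str.join " " (ls.takeWhile (· ≠ ""))] else []) ++
      pvGoB (ls.dropWhile (· ≠ "")) := by
  cases ls with
  | nil => simp [pvGoB]
  | cons s rest =>
    by_cases hs : s = ""
    · simp [hs, List.takeWhile, List.dropWhile, pvGoB]
    · rw [pvGoB]
      simp [hs, List.dropWhile]

theorem pvJoinRuns_eq (ls : List String) (buf : List String) (hb : ∀ b ∈ buf, b ≠ "") :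
    pvJoinRuns buf ls =
      (if buf ++ ls.takeWhile (· ≠ "") ≠ [] then
        [PySem.Str.join " " (buf ++ ls.takeWhile (· ≠ ""))] else []) ++
      pvGoB (ls.dropWhile (· ≠ "")) := by
  induction ls generalizing buf with
  | nil => simp [pvJoinRuns, pvGoB]
  | cons x rest ih =>
    by_cases hx : x = ""
    · subst hx
      have hrest := ih [] (by simp)
      simp only [List.nil_append] at hrest
      have h2 : pvJoinRuns [] rest = pvGoB rest := by
        rw [hrest, ← pvGoB_take_drop]
      have hgo : pvGoB ("" :: rest) = pvGoB rest := by
        rw [pvGoB]; simp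
      simp only [pvJoinRuns, List.takeWhile_cons, List.dropWhile]
      simp [h2, hgo]
    · have hbfun : ∀ b ∈ buf ++ [x], b ≠ "" := by
        intro b hbm
        rcases List.mem_append.1 hbm with h | h
        · exact hb b h
        · simp at h; simp [h, hx]
      have hih := ih (buf ++ [x]) hbfun
      simp only [pvJoinRuns, List.takeWhile_cons, List.dropWhile]
      simp [hx, hih]

theorem pvJoinRuns_nil_eq_goB (ls : List String) : pvJoinRuns [] ls = pvGoB ls := by
  have h := pvJoinRuns_eq ls [] (by simp)
  simp only [List.nil_append] at h
  rw [h, ← pvGoB_take_drop]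

-- ===== VERDICT (by name: the statement is the Claim_ definition above) =====
theorem collapse_to_paragraphs_spec : Claim_equal_collapse_to_paragraphs := by
  intro text _
  unfold Spec_collapse_to_paragraphs collapse_to_paragraphs collapse_to_paragraphs_alt
  have h1 : (PySem.Str.splitlines text).foldl pvStepA ([], []) =
      ((PySem.Str.splitlines text).map PySem.Str.strip).foldl pvStep ([], []) := by
    rw [List.foldl_map]
    apply PySem.List.foldl_congr_mem
    intro st x _
    exact pvStepA_eq st x
  show pvFinish ((PySem.Str.splitlines text).foldl pvStepA ([], [])) = _
  rw [h1, pv_fold_inv, pvJoinRuns_nil_eq_goB]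
  simp
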